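-- pv_equiv track=rewrite | github.com/joilsonsr/lotoDiaDeSorte | processamento/estatisticaSorteio.py | maxFrequenciaOratraso
-- ===== SOURCE A (Python) =====
-- def maxFrequenciaOratraso(dadosSorteio, numeros, maiorFrequencia=True):
--     contagem = dict()#[0 for i in range(1, 32)]
--     for i in range(1, 32):
--         contagem[i] = 0
--     for j in numeros:
--         temp=0
--
--         for i in dadosSorteio:
--             if (j in i) == maiorFrequencia:
--                 temp +=1
--         contagem[j]=temp
--
--     return  contagem
-- ===== SOURCE B (Python) =====
-- def maxFrequenciaOratraso(dadosSorteio, numeros, maiorFrequencia=True):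
--     # One pass over the draws builds an occurrence counter; each requested
--     # number is then answered by a lookup (or its complement vs. the total).
--     occ = {}
--     for draw in dadosSorteio:
--         for x in set(draw):
--             occ[x] = occ.get(x, 0) + 1
--     total = len(dadosSorteio)
--     contagem = {i: 0 for i in range(1, 32)}
--     for j in numeros:
--         c = occ.get(j, 0)
--         contagem[j] = c if maiorFrequencia else total - c
--     return contagem
-- ===== Notes on version B (the rewrite author's own statement) =====
-- stated objective: faster
-- what changed: Replaces the per-number rescan of all draws by a single pass that builds an occurrence counter over the draws, answering each requested number with one dictionary lookup (or total minus it).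
import Mathlib
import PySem

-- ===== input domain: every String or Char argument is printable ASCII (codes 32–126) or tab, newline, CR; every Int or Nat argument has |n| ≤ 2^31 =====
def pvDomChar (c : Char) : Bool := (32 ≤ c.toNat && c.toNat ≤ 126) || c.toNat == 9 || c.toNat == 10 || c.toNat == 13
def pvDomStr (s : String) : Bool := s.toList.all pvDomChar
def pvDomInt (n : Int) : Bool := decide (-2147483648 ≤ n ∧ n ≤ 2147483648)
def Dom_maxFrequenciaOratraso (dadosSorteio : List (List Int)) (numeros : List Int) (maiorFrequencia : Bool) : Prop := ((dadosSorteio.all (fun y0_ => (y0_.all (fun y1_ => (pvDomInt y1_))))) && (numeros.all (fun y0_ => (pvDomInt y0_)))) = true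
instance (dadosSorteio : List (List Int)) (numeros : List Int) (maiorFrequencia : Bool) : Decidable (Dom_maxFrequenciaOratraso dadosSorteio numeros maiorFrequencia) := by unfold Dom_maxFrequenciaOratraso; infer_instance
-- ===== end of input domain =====

-- ===== PORT A =====
-- A: for each requested number, rescan every draw and count matches.
def maxFrequenciaOratraso (dadosSorteio : List (List Int)) (numeros : List Int) (maiorFrequencia : Bool) : List (Int × Int) :=
  let contagem : PySem.Dict Int Int :=
    (PySem.List.pyRange 1 32 1).foldl (fun d i => PySem.Dict.insert d i 0) PySem.Dict.empty
  (numeros.foldl (fun d j =>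
    let temp : Int := dadosSorteio.foldl (fun temp i =>
      if decide (j ∈ i) = maiorFrequencia then temp + 1 else temp) 0
    PySem.Dict.insert d j temp) contagem).items

-- ===== PORT B =====
-- B: one pass over the draws builds an occurrence counter; each number is answered by a lookup.
def maxFrequenciaOratraso_alt (dadosSorteio : List (List Int)) (numeros : List Int) (maiorFrequencia : Bool) : List (Int × Int) :=
  let occ : PySem.Dict Int Int :=
    dadosSorteio.foldl (fun d draw =>
      (PySem.Set.ofList draw).foldl (fun d x => PySem.Dict.insert d x (PySem.Dict.getD d x 0 + 1)) d) PySem.Dict.empty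
  let total : Int := dadosSorteio.length
  let contagem : PySem.Dict Int Int :=
    (PySem.List.pyRange 1 32 1).foldl (fun d i => PySem.Dict.insert d i 0) PySem.Dict.empty
  (numeros.foldl (fun d j =>
    let c : Int := PySem.Dict.getD occ j 0
    PySem.Dict.insert d j (if maiorFrequencia then c else total - c)) contagem).items

-- ===== PRECONDITION & SPEC =====
def Spec_maxFrequenciaOratraso (dadosSorteio : List (List Int)) (numeros : List Int) (maiorFrequencia : Bool) (out : List (Int × Int)) : Prop := out = maxFrequenciaOratraso_alt dadosSorteio numeros maiorFrequencia
instance (dadosSorteio : List (List Int)) (numeros : List Int) (maiorFrequencia : Bool) (out : List (Int × Int)) : Decidable (Spec_maxFrequenciaOratraso dadosSorteio numeros maiorFrequencia out) := by unfold Spec_maxFrequenciaOratraso; infer_instance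

-- ===== CLAIM (what is proved, stated in full; the proofs are below) =====
def Claim_equal_maxFrequenciaOratraso : Prop := ∀ (dadosSorteio : List (List Int)) (numeros : List Int) (maiorFrequencia : Bool), Dom_maxFrequenciaOratraso dadosSorteio numeros maiorFrequencia → Spec_maxFrequenciaOratraso dadosSorteio numeros maiorFrequencia (maxFrequenciaOratraso dadosSorteio numeros maiorFrequencia)

-- ===== LEMMAS AND PROOFS =====

-- B's occurrence counter: the looked-up count is the number of draws containing j.
lemma occ_getD (L : List (List Int)) (d : PySem.Dict Int Int) (j : Int) :
    PySem.Dict.getD (L.foldl (fun d draw =>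
      (PySem.Set.ofList draw).foldl (fun d x => PySem.Dict.insert d x (PySem.Dict.getD d x 0 + 1)) d) d) j 0
    = PySem.Dict.getD d j 0 + (L.countP (fun draw => decide (j ∈ draw)) : Int) := by
  induction L generalizing d with
  | nil => simp
  | cons draw rest ih =>
    simp only [List.foldl_cons, ih, PySem.Dict.getD_foldl_insert_add_one, List.countP_cons]
    by_cases h : j ∈ draw
    · simp [h]; ring
    · have hc : (PySem.Set.ofList draw).count j = 0 :=
        List.count_eq_zero_of_not_mem (by simpa [PySem.Set.mem_ofList] using h)
      simp [hc, h]

-- The draws not containing j and those containing it partition the list.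
lemma countP_split (dadosSorteio : List (List Int)) (j : Int) :
    dadosSorteio.countP (fun i => !decide (j ∈ i))
      + dadosSorteio.countP (fun draw => decide (j ∈ draw)) = dadosSorteio.length := by
  induction dadosSorteio with
  | nil => simp
  | cons hd tl ih =>
    by_cases h : j ∈ hd <;> simp only [List.countP_cons, List.length_cons, h] <;> simp <;> omega

-- A's inner rescan computes exactly B's per-number value.
lemma temp_eq (dadosSorteio : List (List Int)) (j : Int) (maiorFrequencia : Bool) :
    dadosSorteio.foldl (fun temp i =>
        if decide (j ∈ i) = maiorFrequencia then temp + 1 else temp) 0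
    = (if maiorFrequencia
        then (PySem.Dict.getD (dadosSorteio.foldl (fun d draw =>
          (PySem.Set.ofList draw).foldl (fun d x => PySem.Dict.insert d x (PySem.Dict.getD d x 0 + 1)) d)
          PySem.Dict.empty) j 0)
        else (dadosSorteio.length : Int) -
          (PySem.Dict.getD (dadosSorteio.foldl (fun d draw =>
            (PySem.Set.ofList draw).foldl (fun d x => PySem.Dict.insert d x (PySem.Dict.getD d x 0 + 1)) d)
            PySem.Dict.empty) j 0)) := by
  rw [PySem.List.foldl_ite_add_one, occ_getD]
  cases maiorFrequencia with
  | true => simp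
  | false =>
    have h := countP_split dadosSorteio j
    have hcc : List.countP (fun x => decide (decide (j ∈ x) = false)) dadosSorteio
        = List.countP (fun i => !decide (j ∈ i)) dadosSorteio := by
      apply List.countP_congr
      intro x _
      by_cases hx : j ∈ x <;> simp [hx]
    simp only [PySem.Dict.getD_empty, if_false, Bool.false_eq_true]
    rw [hcc]
    omega

theorem maxFrequenciaOratraso_eq (dadosSorteio : List (List Int)) (numeros : List Int) (maiorFrequencia : Bool) :
    maxFrequenciaOratraso dadosSorteio numeros maiorFrequencia
      = maxFrequenciaOratraso_alt dadosSorteio numeros maiorFrequencia := by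
  unfold maxFrequenciaOratraso maxFrequenciaOratraso_alt
  dsimp only
  congr 1
  apply PySem.List.foldl_congr_mem
  intro acc j _
  rw [temp_eq]

-- ===== VERDICT (by name: the statement is the Claim_ definition above) =====
theorem maxFrequenciaOratraso_spec : Claim_equal_maxFrequenciaOratraso := by
  intro ds ns mf _
  unfold Spec_maxFrequenciaOratraso
  exact maxFrequenciaOratraso_eq ds ns mf
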